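-- pv_equiv track=rewrite | github.com/thautwarm/merlin | rml/bc_builder/__init__.py | build_inst
-- ===== SOURCE A (Python) =====
-- import opcode
--
-- def build_inst(op, arg):
--     if arg is 0:
--         return [(op, arg)]
--
--     b = [(op, arg & 0xff)]
--     while arg > 0xff:
--         arg >>= 8
--         b.append((opcode.EXTENDED_ARG, arg & 0xff))
--     b.reverse()
--     return b
-- ===== SOURCE B (Python) =====
-- EXTENDED_ARG = 144  # opcode.EXTENDED_ARG in CPython
--
-- def build_inst(op, arg):
--     if arg > 0xff:
--         return build_inst(EXTENDED_ARG, arg >> 8) + [(op, arg & 0xff)]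
--     return [(op, arg & 0xff)]
-- ===== Notes on version B (the rewrite author's own statement) =====
-- stated objective: simpler
-- what changed: Replaced the while-loop with accumulator list and final reverse() by a direct recursion over byte-significance levels that emits the EXTENDED_ARG prefixes already in big-endian order, eliminating the mutable list, the loop and the reverse.
import Mathlib
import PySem

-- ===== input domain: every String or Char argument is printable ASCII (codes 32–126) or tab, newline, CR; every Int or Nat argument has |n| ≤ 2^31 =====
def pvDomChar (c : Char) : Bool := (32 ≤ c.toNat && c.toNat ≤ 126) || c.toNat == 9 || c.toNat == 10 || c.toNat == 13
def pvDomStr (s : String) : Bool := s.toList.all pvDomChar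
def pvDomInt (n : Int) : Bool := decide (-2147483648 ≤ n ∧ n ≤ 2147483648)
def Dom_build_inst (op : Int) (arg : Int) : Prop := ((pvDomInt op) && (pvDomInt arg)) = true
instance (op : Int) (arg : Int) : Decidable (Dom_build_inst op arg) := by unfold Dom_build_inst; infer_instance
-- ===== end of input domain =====

-- B replaces A's while-loop + accumulator + reverse() by a recursion over byte levels
-- that emits the EXTENDED_ARG prefixes directly in big-endian order (objective: simpler).

-- `arg >> 8`: Python's arithmetic right shift on int equals floor division by 256 (exact
-- for all ints), ported as PySem.Int.floordiv arg 256; `arg & 0xff` equals Python's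
-- `arg % 0x100` for all ints (two's-complement masking), ported as PySem.Int.mod arg 256.

-- ===== PORT A =====
-- the while-loop of A: state (arg, b); termination: arg shrinks while arg > 0xff
def buildLoopA (arg : Int) (b : List (Int × Int)) : List (Int × Int) :=
  if _h : arg > 0xff then
    buildLoopA (PySem.Int.floordiv arg 256)
      (b ++ [(144, PySem.Int.mod (PySem.Int.floordiv arg 256) 256)])  -- opcode.EXTENDED_ARG = 144
  else b
termination_by arg.toNat
decreasing_by
  have := PySem.Int.floordiv_eq_ediv_of_pos (a := arg) (b := 256) (by norm_num)
  rw [this]; omega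

def build_inst (op : Int) (arg : Int) : List (Int × Int) :=
  if arg = 0 then [(op, arg)]
  else (buildLoopA arg [(op, PySem.Int.mod arg 256)]).reverse

-- ===== PORT B =====
def build_inst_alt (op : Int) (arg : Int) : List (Int × Int) :=
  if _h : arg > 0xff then
    build_inst_alt 144 (PySem.Int.floordiv arg 256) ++ [(op, PySem.Int.mod arg 256)]
  else [(op, PySem.Int.mod arg 256)]
termination_by arg.toNat
decreasing_by
  have := PySem.Int.floordiv_eq_ediv_of_pos (a := arg) (b := 256) (by norm_num)
  rw [this]; omega

-- ===== PRECONDITION & SPEC =====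
def Spec_build_inst (op : Int) (arg : Int) (out : List (Int × Int)) : Prop := out = build_inst_alt op arg
instance (op : Int) (arg : Int) (out : List (Int × Int)) : Decidable (Spec_build_inst op arg out) := by unfold Spec_build_inst; infer_instance

-- ===== CLAIM (what is proved, stated in full; the proofs are below) =====
def Claim_equal_build_inst : Prop := ∀ (op : Int) (arg : Int), Dom_build_inst op arg → Spec_build_inst op arg (build_inst op arg)

-- ===== LEMMAS AND PROOFS =====

theorem buildLoopA_stop (arg : Int) (b : List (Int × Int)) (h : ¬ arg > 0xff) :
    buildLoopA arg b = b := by rw [buildLoopA]; simp [h]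

theorem buildLoopA_step (arg : Int) (b : List (Int × Int)) (h : arg > 0xff) :
    buildLoopA arg b = buildLoopA (PySem.Int.floordiv arg 256)
      (b ++ [(144, PySem.Int.mod (PySem.Int.floordiv arg 256) 256)]) := by
  rw [buildLoopA]; simp [h]

-- the loop only appends to the accumulator
theorem buildLoopA_acc (n : Nat) (arg : Int) (hn : arg.toNat ≤ n) (b : List (Int × Int)) :
    buildLoopA arg b = b ++ buildLoopA arg [] := by
  induction n generalizing arg b with
  | zero =>
    have h : ¬ arg > 0xff := by omega
    rw [buildLoopA_stop _ _ h, buildLoopA_stop _ _ h]; simp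
  | succ n ih =>
    by_cases h : arg > 0xff
    · have harg' : (PySem.Int.floordiv arg 256).toNat ≤ n := by
        have := PySem.Int.floordiv_eq_ediv_of_pos (a := arg) (b := 256) (by norm_num)
        rw [this]; omega
      rw [buildLoopA_step _ _ h, buildLoopA_step _ _ h,
          ih _ harg' (b ++ _), ih _ harg' ([] ++ _)]
      simp
    · rw [buildLoopA_stop _ _ h, buildLoopA_stop _ _ h]; simp

-- reversing A's loop output and appending the first instruction yields B's recursion
theorem loopA_reverse (n : Nat) (arg : Int) (hn : arg.toNat ≤ n) (op : Int) :
    (buildLoopA arg []).reverse ++ [(op, PySem.Int.mod arg 256)] = build_inst_alt op arg := by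
  induction n generalizing arg op with
  | zero =>
    have h : ¬ arg > 0xff := by omega
    rw [buildLoopA_stop _ _ h, build_inst_alt]; simp [h]
  | succ n ih =>
    by_cases h : arg > 0xff
    · have harg' : (PySem.Int.floordiv arg 256).toNat ≤ n := by
        have := PySem.Int.floordiv_eq_ediv_of_pos (a := arg) (b := 256) (by norm_num)
        rw [this]; omega
      rw [buildLoopA_step _ _ h, build_inst_alt]
      simp only [h, dite_true]
      rw [buildLoopA_acc n _ harg', ← ih _ harg' 144]
      simp
    · rw [buildLoopA_stop _ _ h, build_inst_alt]; simp [h]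

-- ===== VERDICT (by name: the statement is the Claim_ definition above) =====
theorem build_inst_spec : Claim_equal_build_inst := by
  intro op arg _
  unfold Spec_build_inst build_inst
  by_cases h0 : arg = 0
  · subst h0
    rw [build_inst_alt]
    norm_num [PySem.Int.mod]
  · simp only [h0, if_false]
    rw [buildLoopA_acc arg.toNat arg le_rfl]
    rw [← loopA_reverse arg.toNat arg le_rfl op]
    simp
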